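-- pv_equiv track=rewrite | github.com/natnaeleyuel/leetcode_problems_solution | 2533-bitwise-xor-of-all-pairings/2533-bitwise-xor-of-all-pairings.py | xorAllNums
-- ===== SOURCE A (Python) =====
-- from typing import List
--
-- def xorAllNums(nums1: List[int], nums2: List[int]) -> int:
--     result = 0
--     if len(nums1) % 2 != 0:
--         for num in nums2:
--             result ^= num
--
--     if len(nums2) % 2 != 0:
--         for num in nums1:
--             result ^= num
--
--     return result
-- ===== SOURCE B (Python) =====
-- from typing import List
--
-- def xorAllNums(nums1: List[int], nums2: List[int]) -> int:
--     result = 0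
--     for a in nums1:
--         for b in nums2:
--             result ^= a ^ b
--     return result
-- ===== Notes on version B (the rewrite author's own statement) =====
-- stated objective: alternative
-- what changed: Replaces A's length-parity shortcut with the direct brute-force double loop that XORs every pairwise a^b.
import Mathlib
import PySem

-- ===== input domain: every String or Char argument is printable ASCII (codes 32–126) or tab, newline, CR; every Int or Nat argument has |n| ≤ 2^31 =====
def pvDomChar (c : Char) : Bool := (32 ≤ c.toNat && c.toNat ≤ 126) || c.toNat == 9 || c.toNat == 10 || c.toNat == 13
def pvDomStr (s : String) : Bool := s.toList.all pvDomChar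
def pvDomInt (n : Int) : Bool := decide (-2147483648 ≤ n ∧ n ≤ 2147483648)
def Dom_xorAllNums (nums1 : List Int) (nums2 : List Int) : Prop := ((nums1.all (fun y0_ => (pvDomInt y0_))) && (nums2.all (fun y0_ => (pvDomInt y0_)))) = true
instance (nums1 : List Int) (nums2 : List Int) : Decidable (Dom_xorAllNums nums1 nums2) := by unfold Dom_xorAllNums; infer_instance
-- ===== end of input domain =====

-- B replaces A's length-parity shortcut by the direct brute-force double loop
-- XORing every pairwise a ^ b (objective: alternative; equivalent by XOR algebra).


-- ===== PORT A =====
-- literal transliteration of A: result = 0; two parity-guarded accumulation loops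
def xorAllNums (nums1 : List Int) (nums2 : List Int) : Int :=
  let result : Int := 0
  let result :=
    if nums1.length % 2 ≠ 0 then
      nums2.foldl (fun r num => PySem.Int.bxor r num) result
    else result
  let result :=
    if nums2.length % 2 ≠ 0 then
      nums1.foldl (fun r num => PySem.Int.bxor r num) result
    else result
  result

-- ===== PORT B =====
-- literal transliteration of B: nested loops, result ^= a ^ b for every pair
def xorAllNums_alt (nums1 : List Int) (nums2 : List Int) : Int :=
  nums1.foldl
    (fun result a =>
      nums2.foldl (fun result b => PySem.Int.bxor result (PySem.Int.bxor a b)) result)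
    0

-- ===== PRECONDITION & SPEC =====
def Spec_xorAllNums (nums1 : List Int) (nums2 : List Int) (out : Int) : Prop := out = xorAllNums_alt nums1 nums2
instance (nums1 : List Int) (nums2 : List Int) (out : Int) : Decidable (Spec_xorAllNums nums1 nums2 out) := by unfold Spec_xorAllNums; infer_instance

-- ===== CLAIM (what is proved, stated in full; the proofs are below) =====
def Claim_equal_xorAllNums : Prop := ∀ (nums1 : List Int) (nums2 : List Int), Dom_xorAllNums nums1 nums2 → Spec_xorAllNums nums1 nums2 (xorAllNums nums1 nums2)

-- ===== LEMMAS AND PROOFS =====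

-- PySem.Int.bxor agrees with Mathlib's Int.xor (constructor cases)
theorem pvBxor_eq_xor (a b : Int) : PySem.Int.bxor a b = Int.xor a b := by
  rcases a with m | m <;> rcases b with n | n <;>
    simp [PySem.Int.bxor, Int.xor, Int.negSucc_eq] <;> omega

theorem pvXor_comm (a b : Int) : Int.xor a b = Int.xor b a := by
  rcases a with m | m <;> rcases b with n | n <;> simp [Int.xor, Nat.xor_comm]

theorem pvXor_assoc (a b c : Int) :
    Int.xor (Int.xor a b) c = Int.xor a (Int.xor b c) := by
  rcases a with m | m <;> rcases b with n | n <;> rcases c with k | k <;>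
    simp [Int.xor, Nat.xor_assoc]

theorem pvBxor_comm (a b : Int) : PySem.Int.bxor a b = PySem.Int.bxor b a := by
  simp [pvBxor_eq_xor, pvXor_comm a b]

theorem pvBxor_assoc (a b c : Int) :
    PySem.Int.bxor (PySem.Int.bxor a b) c = PySem.Int.bxor a (PySem.Int.bxor b c) := by
  simp [pvBxor_eq_xor, pvXor_assoc]

theorem pvBxor_left_comm (a b c : Int) :
    PySem.Int.bxor a (PySem.Int.bxor b c) = PySem.Int.bxor b (PySem.Int.bxor a c) := by
  rw [← pvBxor_assoc, pvBxor_comm a b, pvBxor_assoc]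

theorem pvZero_bxor (a : Int) : PySem.Int.bxor 0 a = a := by
  rw [pvBxor_comm]; simp

theorem pvBxor_cancel_left (a c : Int) :
    PySem.Int.bxor a (PySem.Int.bxor a c) = c := by
  rw [← pvBxor_assoc]; simp [pvZero_bxor]

-- accumulator shift for an xor-accumulating fold
theorem pvFoldl_shift (f : α → Int) (l : List α) :
    ∀ r s : Int,
      l.foldl (fun acc x => PySem.Int.bxor acc (f x)) (PySem.Int.bxor r s)
        = PySem.Int.bxor r (l.foldl (fun acc x => PySem.Int.bxor acc (f x)) s) := by
  induction l with
  | nil => intro r s; rfl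
  | cons x t ih =>
      intro r s
      simp only [List.foldl_cons, pvBxor_assoc]
      exact ih r (PySem.Int.bxor s (f x))

-- plain xor of a list
def pvX (l : List Int) : Int := l.foldl (fun r b => PySem.Int.bxor r b) 0

theorem pvX_cons (b : Int) (t : List Int) : pvX (b :: t) = PySem.Int.bxor b (pvX t) := by
  have h := pvFoldl_shift (fun x : Int => x) t b 0
  simpa [pvX, pvZero_bxor] using h

-- the inner loop of B in closed form
theorem pvInner_eq (l : List Int) (a : Int) :
    ∀ r : Int,
      l.foldl (fun acc b => PySem.Int.bxor acc (PySem.Int.bxor a b)) r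
        = PySem.Int.bxor r
            (PySem.Int.bxor (if l.length % 2 = 1 then a else 0) (pvX l)) := by
  induction l with
  | nil => intro r; simp [pvX, pvZero_bxor]
  | cons b t ih =>
      intro r
      rw [List.foldl_cons, ih, pvX_cons]
      rcases Nat.mod_two_eq_zero_or_one t.length with h | h
      · have h3 : (t.length + 1) % 2 = 1 := by omega
        simp [List.length_cons, h, h3, pvBxor_assoc, pvBxor_left_comm,
          pvBxor_cancel_left, pvZero_bxor]
      · have h3 : (t.length + 1) % 2 = 0 := by omega
        simp [List.length_cons, h, h3, pvBxor_assoc, pvBxor_left_comm,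
          pvBxor_cancel_left, pvZero_bxor]

-- the outer loop of B in closed form
theorem pvOuter_eq (nums2 : List Int) (l : List Int) :
    ∀ r : Int,
      l.foldl
          (fun acc a =>
            nums2.foldl (fun acc b => PySem.Int.bxor acc (PySem.Int.bxor a b)) acc)
          r
        = PySem.Int.bxor r
            (PySem.Int.bxor (if nums2.length % 2 = 1 then pvX l else 0)
              (if l.length % 2 = 1 then pvX nums2 else 0)) := by
  induction l with
  | nil => intro r; simp [pvX, pvZero_bxor]
  | cons a t ih =>
      intro r
      rw [List.foldl_cons, pvInner_eq nums2 a r, ih, pvX_cons]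
      rcases Nat.mod_two_eq_zero_or_one t.length with h | h <;>
        rcases Nat.mod_two_eq_zero_or_one nums2.length with h2 | h2
      · have h3 : (t.length + 1) % 2 = 1 := by omega
        simp [List.length_cons, h, h2, h3, pvBxor_assoc, pvBxor_left_comm,
          pvBxor_cancel_left, pvZero_bxor]
      · have h3 : (t.length + 1) % 2 = 1 := by omega
        simp [List.length_cons, h, h2, h3, pvBxor_assoc, pvBxor_left_comm,
          pvBxor_cancel_left, pvZero_bxor]
        rw [pvBxor_comm (pvX nums2) (pvX t)]
      · have h3 : (t.length + 1) % 2 = 0 := by omega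
        simp [List.length_cons, h, h2, h3, pvBxor_assoc, pvBxor_left_comm,
          pvBxor_cancel_left, pvZero_bxor]
      · have h3 : (t.length + 1) % 2 = 0 := by omega
        simp [List.length_cons, h, h2, h3, pvBxor_assoc, pvBxor_left_comm,
          pvBxor_cancel_left, pvZero_bxor]
        rw [pvBxor_comm (pvX t) r]

-- A's loops in terms of pvX
theorem pvFoldA (l : List Int) (r : Int) :
    l.foldl (fun acc num => PySem.Int.bxor acc num) r = PySem.Int.bxor r (pvX l) := by
  have h := pvFoldl_shift (fun x : Int => x) l r 0
  simpa [pvX] using h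

-- ===== VERDICT (by name: the statement is the Claim_ definition above) =====
theorem xorAllNums_spec : Claim_equal_xorAllNums := by
  intro nums1 nums2 _
  unfold Spec_xorAllNums xorAllNums xorAllNums_alt
  rw [pvOuter_eq nums2 nums1 0, pvZero_bxor]
  rcases Nat.mod_two_eq_zero_or_one nums1.length with h1 | h1 <;>
    rcases Nat.mod_two_eq_zero_or_one nums2.length with h2 | h2 <;>
    simp [h1, h2, pvFoldA, pvZero_bxor, pvBxor_comm (pvX nums1) (pvX nums2)]
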